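-- pv_equiv track=rewrite | github.com/ljnsn/cz-conventional-gitmoji | src/gitmojify/mojify.py | _filter_comments
-- ===== SOURCE A (Python) =====
-- def _filter_comments(message: str) -> str:
--     """Filter out comments from the message.
--
--     Copied from https://github.com/commitizen-tools/commitizen/blob/a54bf542012257a338edb54ca16d11ba6beef0ba/commitizen/commands/check.py#L113-L141
--     """
--     lines = []
--     for line in message.split("\n"):
--         if "# ------------------------ >8 ------------------------" in line:
--             break
--         if not line.startswith("#"):
--             lines.append(line)
--     return "\n".join(lines)
-- ===== SOURCE B (Python) =====
-- SCISSORS = "# ------------------------ >8 ------------------------"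
--
--
-- def _filter_comments(message: str) -> str:
--     """Filter out comments from the message.
--
--     Back-to-front scan with a reset: walk the lines in reverse, collecting
--     non-comment lines; whenever a scissors line is met everything collected
--     so far lies after the (leftmost-so-far) cut and is discarded.  The
--     leftmost scissors line is seen last, so the final reset leaves exactly
--     the non-comment lines before the first cut.
--     """
--     kept = []
--     for line in reversed(message.split("\n")):
--         if SCISSORS in line:
--             kept = []
--         elif not line.startswith("#"):
--             kept.append(line)
--     kept.reverse()
--     return "\n".join(kept)
-- ===== Notes on version B (the rewrite author's own statement) =====
-- stated objective: alternative
-- what changed: A's forward loop that breaks at the first scissors line is replaced by a backwards scan with a reset: lines are traversed in reverse, non-comment lines collected, and the accumulator is emptied each time a scissors line is met, so the leftmost scissors line (seen last) discards everything after the cut; the collected list is reversed and joined.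
import Mathlib
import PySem

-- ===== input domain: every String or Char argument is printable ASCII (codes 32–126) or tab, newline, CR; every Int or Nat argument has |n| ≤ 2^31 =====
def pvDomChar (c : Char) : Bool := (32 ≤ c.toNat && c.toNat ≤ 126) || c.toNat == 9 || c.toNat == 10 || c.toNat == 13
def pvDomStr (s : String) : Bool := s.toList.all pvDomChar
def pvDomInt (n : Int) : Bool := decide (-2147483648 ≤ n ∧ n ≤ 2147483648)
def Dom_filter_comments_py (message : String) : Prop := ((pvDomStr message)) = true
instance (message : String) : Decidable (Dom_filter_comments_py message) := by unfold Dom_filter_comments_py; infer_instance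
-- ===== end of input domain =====

-- B replaces A's forward loop-with-break by a backwards scan with a reset-on-scissors accumulator; same O(n) cost.

def pvScissors : String := "# ------------------------ >8 ------------------------"

-- ===== PORT A =====
-- A's for-loop with break, carried accumulator `lines`
def pvALoop (acc : List String) : List String → List String
  | [] => acc
  | l :: rest =>
    if PySem.Str.isIn pvScissors l then acc
    else if !PySem.Str.startswith l "#" then pvALoop (acc ++ [l]) rest
    else pvALoop acc rest

def filter_comments_py (message : String) : String :=
  PySem.Str.join "\n" (pvALoop [] ((PySem.Str.split? message "\n").getD []))

-- ===== PORT B =====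
-- Source B's loop body over reversed(lines): reset on scissors, append non-comment lines
def pvBStep (kept : List String) (line : String) : List String :=
  if PySem.Str.isIn pvScissors line then []
  else if !PySem.Str.startswith line "#" then kept ++ [line]
  else kept

def filter_comments_py_alt (message : String) : String :=
  let lines := (PySem.Str.split? message "\n").getD []
  let kept := lines.reverse.foldl pvBStep []
  PySem.Str.join "\n" kept.reverse

-- ===== PRECONDITION & SPEC =====
def Spec_filter_comments_py (message : String) (out : String) : Prop := out = filter_comments_py_alt message
instance (message : String) (out : String) : Decidable (Spec_filter_comments_py message out) := by unfold Spec_filter_comments_py; infer_instance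

-- ===== CLAIM (what is proved, stated in full; the proofs are below) =====
def Claim_equal_filter_comments_py : Prop := ∀ (message : String), Dom_filter_comments_py message → Spec_filter_comments_py message (filter_comments_py message)

-- ===== LEMMAS AND PROOFS =====
theorem pvALoop_acc (lines : List String) : ∀ (acc : List String),
    pvALoop acc lines = acc ++ pvALoop [] lines := by
  induction lines with
  | nil => intro acc; simp [pvALoop]
  | cons l rest ih =>
    intro acc
    by_cases hs : PySem.Chars.isIn pvScissors.toList l.toList = true
    · simp [pvALoop, PySem.Str.isIn, hs]
    · cases hc : PySem.Chars.startswith l.toList ['#'] with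
      | true =>
        simp [pvALoop, PySem.Str.isIn, PySem.Str.startswith, hs, hc]
        exact ih acc
      | false =>
        simp only [pvALoop, PySem.Str.isIn, PySem.Str.startswith, hs, hc, if_false,
          Bool.not_false, if_true, Bool.false_eq_true]
        simp [hc]
        rw [ih (acc ++ [l]), ih [l], List.append_assoc]

-- B's backwards foldl is the reverse of what A's forward loop appends to its accumulator.
theorem pvB_foldr (lines : List String) :
    lines.reverse.foldl pvBStep [] = (pvALoop [] lines).reverse := by
  rw [List.foldl_reverse]
  induction lines with
  | nil => simp [pvALoop]
  | cons l rest ih =>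
    simp only [List.foldr_cons, ih]
    by_cases hs : PySem.Chars.isIn pvScissors.toList l.toList = true
    · simp [pvALoop, pvBStep, PySem.Str.isIn, hs]
    · cases hc : PySem.Chars.startswith l.toList ['#'] with
      | true => simp [pvALoop, pvBStep, PySem.Str.isIn, PySem.Str.startswith, hs, hc]
      | false =>
        simp only [pvALoop, pvBStep, PySem.Str.isIn, PySem.Str.startswith, hs, hc, if_false,
          Bool.not_false, if_true, Bool.false_eq_true]
        simp [hc]
        rw [pvALoop_acc rest [l], List.reverse_append]
        rfl

-- ===== VERDICT (by name: the statement is the Claim_ definition above) =====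
theorem filter_comments_py_spec : Claim_equal_filter_comments_py := by
  intro message _
  unfold Spec_filter_comments_py filter_comments_py filter_comments_py_alt
  simp only []
  rw [pvB_foldr]
  simp
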